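-- pv_equiv track=rewrite | github.com/DarkPhantom1805/Python-Projects | text_encryptor/main.py | multi_tap
-- ===== SOURCE A (Python) =====
-- def multi_tap(text):
--     code = ""
--
--     multi_tap = {
--         "a" : 2,
--         "b" : 22,
--         "c" : 222,
--         "d" : 3,
--         "e" : 33,
--         "f" : 333,
--         "g" : 4,
--         "h" : 44,
--         "i" : 444,
--         "j" : 5,
--         "k" : 55,
--         "l" : 555,
--         "m" : 6,
--         "n" : 66,
--         "o" : 666,
--         "p" : 7,
--         "q" : 77,
--         "r" : 777,
--         "s" : 7777,
--         "t" : 8,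
--         "u" : 88,
--         "v" : 888,
--         "w" : 9,
--         "x" : 99,
--         "y" : 999,
--         "z" : 9999
--     }
--
--     for x in text:
--         if str(x).isalpha():
--             code += str(multi_tap.get(x.lower()))
--         else:
--             code += x
--
--     return code
-- ===== SOURCE B (Python) =====
-- def multi_tap(text):
--     parts = []
--     for x in text:
--         if x.isalpha():
--             k = ord(x.lower()) - 97
--             d = 2 + (k - (k >= 18) - (k >= 25)) // 3
--             presses = k - 3 * (d - 2) - (d > 7) + 1
--             parts.append(str(d) * presses)
--         else:
--             parts.append(x)
--     return "".join(parts)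
-- ===== Notes on version B (the rewrite author's own statement) =====
-- stated objective: simpler
-- what changed: Replaces the 26-entry literal code dict with a closed-form arithmetic computation: the letter's alphabet index gives its keypad digit and press count directly (adjusting for the 4-letter keys 7 and 9), and the parts are joined once instead of repeated string concatenation.
import Mathlib
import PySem

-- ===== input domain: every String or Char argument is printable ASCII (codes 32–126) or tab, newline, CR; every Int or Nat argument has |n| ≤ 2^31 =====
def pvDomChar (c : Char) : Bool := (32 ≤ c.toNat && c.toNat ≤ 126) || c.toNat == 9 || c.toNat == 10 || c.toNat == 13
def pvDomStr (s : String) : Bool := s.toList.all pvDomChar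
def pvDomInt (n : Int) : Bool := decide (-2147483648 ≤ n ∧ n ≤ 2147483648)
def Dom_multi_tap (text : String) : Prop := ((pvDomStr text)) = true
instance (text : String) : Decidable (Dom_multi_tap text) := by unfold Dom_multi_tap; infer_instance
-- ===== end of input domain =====

-- B computes each letter's keypad code by closed-form arithmetic on the letter's alphabet
-- index instead of A's 26-entry literal dict, and joins the parts once. Objective: simpler.

-- ===== PORT A =====
-- the literal dict from A (string keys 'a'..'z' to the int codes)
def pvTapDict : PySem.Dict String Int :=
  PySem.Dict.ofList [("a", 2), ("b", 22), ("c", 222), ("d", 3), ("e", 33), ("f", 333),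
    ("g", 4), ("h", 44), ("i", 444), ("j", 5), ("k", 55), ("l", 555), ("m", 6), ("n", 66),
    ("o", 666), ("p", 7), ("q", 77), ("r", 777), ("s", 7777), ("t", 8), ("u", 88),
    ("v", 888), ("w", 9), ("x", 99), ("y", 999), ("z", 9999)]

-- 'code += …' ported on the Char-list side (exact: String '+=' is list append of the chars);
-- str(dict.get(...)) is str(int) on a hit and the literal "None" on a miss, exactly as Python.
def multi_tap (text : String) : String :=
  String.mk (text.toList.foldl (fun code x =>
    if PySem.Chars.isalpha x then
      code ++ (match pvTapDict.get? (String.mk [PySem.Chars.lowerChar x]) with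
               | some n => PySem.Int.toChars n
               | none => "None".toList)
    else
      code ++ [x]) [])

-- ===== PORT B =====
-- Source B's arithmetic body for one letter: k = ord(lower)-97, digit and press count by
-- closed form; str(d) * presses is the digit's chars replicated (exact for str*int,
-- empty when presses ≤ 0, as in Python)
def pvCode (k : Int) : List Char :=
  let d : Int := 2 + PySem.Int.floordiv (k - (if k ≥ 18 then 1 else 0) - (if k ≥ 25 then 1 else 0)) 3
  let presses : Int := k - 3 * (d - 2) - (if d > 7 then 1 else 0) + 1
  (List.replicate presses.toNat (PySem.Int.toChars d)).flatten

-- ''.join(parts) of per-char parts = flatten of the char-lists (exact)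
def multi_tap_alt (text : String) : String :=
  String.mk ((text.toList.map (fun x =>
    if PySem.Chars.isalpha x then pvCode ((PySem.Chars.lowerChar x).toNat - 97)
    else [x])).flatten)

-- ===== PRECONDITION & SPEC =====
def Spec_multi_tap (text : String) (out : String) : Prop := out = multi_tap_alt text
instance (text : String) (out : String) : Decidable (Spec_multi_tap text out) := by unfold Spec_multi_tap; infer_instance

-- ===== CLAIM =====
def Claim_equal_multi_tap : Prop := ∀ (text : String), Dom_multi_tap text → Spec_multi_tap text (multi_tap text)

-- ===== LEMMAS AND PROOFS =====

def pvStepA (x : Char) : List Char :=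
  if PySem.Chars.isalpha x then
    (match pvTapDict.get? (String.mk [PySem.Chars.lowerChar x]) with
     | some n => PySem.Int.toChars n
     | none => "None".toList)
  else [x]

def pvStepB (x : Char) : List Char :=
  if PySem.Chars.isalpha x then pvCode ((PySem.Chars.lowerChar x).toNat - 97) else [x]

theorem pv_foldl_gen (f : Char → List Char) (l : List Char) (acc : List Char) :
    l.foldl (fun code x => code ++ f x) acc = acc ++ (l.map f).flatten := by
  induction l generalizing acc with
  | nil => simp
  | cons x xs ih => simp [List.foldl_cons, ih, List.append_assoc]

set_option maxRecDepth 20000 in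
theorem pv_step_eq_of_lt (n : Nat) (hn : n < 127) : pvStepA (Char.ofNat n) = pvStepB (Char.ofNat n) := by
  revert n hn
  decide

theorem pv_step_eq (c : Char) (hc : pvDomChar c = true) : pvStepA c = pvStepB c := by
  have h127 : c.toNat < 127 := by
    unfold pvDomChar at hc
    simp only [Bool.or_eq_true, Bool.and_eq_true, decide_eq_true_eq, beq_iff_eq] at hc
    generalize c.toNat = m at hc ⊢
    rcases hc with ⟨_, h⟩ | h | h | h <;> omega
  have := pv_step_eq_of_lt c.toNat h127
  rwa [Char.ofNat_toNat] at this

-- ===== VERDICT =====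
theorem multi_tap_spec : Claim_equal_multi_tap := by
  intro text hdom
  unfold Spec_multi_tap
  have hall : ∀ c ∈ text.toList, pvDomChar c = true := by
    simpa [Dom_multi_tap, pvDomStr, List.all_eq_true] using hdom
  have hbody : (fun (code : List Char) (x : Char) =>
      if PySem.Chars.isalpha x then
        code ++ (match pvTapDict.get? (String.mk [PySem.Chars.lowerChar x]) with
                 | some n => PySem.Int.toChars n
                 | none => "None".toList)
      else code ++ [x]) = (fun code x => code ++ pvStepA x) := by
    funext code x
    by_cases h : PySem.Chars.isalpha x <;> simp [pvStepA, h]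
  have h2 : text.toList.map pvStepA = text.toList.map pvStepB :=
    List.map_congr_left (fun c hc => pv_step_eq c (hall c hc))
  show multi_tap text = multi_tap_alt text
  unfold multi_tap multi_tap_alt
  rw [hbody, pv_foldl_gen, h2]
  simp only [List.nil_append]
  rfl
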